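-- pv_equiv track=rewrite | github.com/GonzaloMBustos/software-engineering-2 | P1.py | exercise5
-- ===== SOURCE A (Python) =====
-- def exercise5(n: int) -> int:
--     r: int = 0
--     if n >= 0:
--         i: int = 0
--         while i < n:
--             if i % 2 == 1:
--                 r += i
--             i += 1
--     return r
-- ===== SOURCE B (Python) =====
-- def exercise5(n: int) -> int:
--     if n <= 0:
--         return 0
--     k = n // 2
--     return k * k
-- ===== Notes on version B (the rewrite author's own statement) =====
-- stated objective: faster
-- what changed: Replaces the O(n) loop summing odd i < n with the closed form (n//2)**2.
import Mathlib
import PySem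

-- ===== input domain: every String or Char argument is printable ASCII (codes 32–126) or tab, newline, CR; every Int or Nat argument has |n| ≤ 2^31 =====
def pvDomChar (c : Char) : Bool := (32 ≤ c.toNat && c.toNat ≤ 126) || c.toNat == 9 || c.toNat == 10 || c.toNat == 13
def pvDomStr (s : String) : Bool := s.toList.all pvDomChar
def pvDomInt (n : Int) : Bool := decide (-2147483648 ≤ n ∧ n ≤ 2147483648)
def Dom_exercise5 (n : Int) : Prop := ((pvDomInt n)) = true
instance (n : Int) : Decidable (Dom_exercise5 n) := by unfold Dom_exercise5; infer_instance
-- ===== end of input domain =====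

-- B replaces A's O(n) loop summing odd i < n by the closed form (n//2)^2 (asymptotically faster).


-- ===== PORT A =====
-- while i < n with i starting at 0 and step 1 ≡ fold over pyRange 0 n 1 (exact)
def exercise5 (n : Int) : Int :=
  if n ≥ 0 then
    (PySem.List.pyRange 0 n 1).foldl
      (fun r i => if PySem.Int.mod i 2 = 1 then r + i else r) 0
  else 0

-- ===== PORT B =====
def exercise5_alt (n : Int) : Int :=
  if n ≤ 0 then 0
  else
    let k := PySem.Int.floordiv n 2
    k * k

-- ===== PRECONDITION & SPEC =====
def Spec_exercise5 (n : Int) (out : Int) : Prop := out = exercise5_alt n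
instance (n : Int) (out : Int) : Decidable (Spec_exercise5 n out) := by unfold Spec_exercise5; infer_instance

-- ===== CLAIM (what is proved, stated in full; the proofs are below) =====
def Claim_equal_exercise5 : Prop := ∀ (n : Int), Dom_exercise5 n → Spec_exercise5 n (exercise5 n)

-- ===== LEMMAS AND PROOFS =====

-- closed form for the loop over range m (natural upper bound)
theorem exercise5_loop_closed (m : ℕ) :
    (PySem.List.pyRange 0 (m : Int) 1).foldl
      (fun r i => if PySem.Int.mod i 2 = 1 then r + i else r) 0
      = ((m : Int) / 2) * ((m : Int) / 2) := by
  induction m with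
  | zero => simp [PySem.List.pyRange]
  | succ k ih =>
    have h : (PySem.List.pyRange 0 ((k : Int) + 1) 1)
        = PySem.List.pyRange 0 (k : Int) 1 ++ [(k : Int)] := by
      rw [PySem.List.pyRange_one_append 0 (k : Int) ((k : Int) + 1)
            (Int.natCast_nonneg k) (by omega),
          PySem.List.pyRange_one_cons (a := (k : Int)) (b := (k : Int) + 1) (by omega),
          PySem.List.pyRange_one_eq_nil (a := (k : Int) + 1) (b := (k : Int) + 1) (by omega)]
    push_cast
    rw [h, List.foldl_append, ih]
    simp only [List.foldl]
    rw [PySem.Int.mod_eq_emod_of_pos (by omega)]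
    rcases Int.even_or_odd (k : Int) with he | ho
    · obtain ⟨t, ht⟩ := he
      rw [if_neg (by omega)]
      have heq : ((k : Int) + 1) / 2 = (k : Int) / 2 := by omega
      rw [heq]
    · obtain ⟨t, ht⟩ := ho
      rw [if_pos (by omega)]
      have h1 : ((k : Int) + 1) / 2 = t + 1 := by omega
      have h2 : (k : Int) / 2 = t := by omega
      rw [h1, h2, ht]; ring

-- ===== VERDICT (by name: the statement is the Claim_ definition above) =====
theorem exercise5_spec : Claim_equal_exercise5 := by
  unfold Claim_equal_exercise5
  intro n _
  unfold Spec_exercise5 exercise5 exercise5_alt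
  by_cases hle : n ≤ 0
  · rcases eq_or_lt_of_le hle with h0 | hneg
    · subst h0
      simp [PySem.List.pyRange]
    · rw [if_neg (by omega), if_pos hle]
  · have hpos : 0 < n := by omega
    have hn : n = ((n.toNat : ℕ) : Int) := by omega
    rw [if_pos (by omega), if_neg (by omega)]
    rw [hn, exercise5_loop_closed, PySem.Int.floordiv_eq_ediv_of_pos (by omega)]
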